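-- pv_equiv track=rewrite | github.com/adamcy99/Study | CodeSignal Study/Practice2.py | solution
-- ===== SOURCE A (Python) =====
-- def solution(a, m, k):
--     seen = {}
--     output = 0
--
--     # Index of the first element of the last pair we encountered that adds up to
--     # k
--     first_element_index = -1
--
--     for i, num in enumerate(a):
--         diff = k - num
--         # Check if there is addend in the current subarray.
--         if diff in seen and i - seen[diff] < m:
--             first_element_index = max(first_element_index, seen[diff])
--         # If we have m elements in the subarray the last pair that adds up to k
--         # is within the bounds the subarray, increment the counter.
--         if i >= m-1 and i - first_element_index < m:
--             output += 1
--         seen[num] = i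
--
--     return output
-- ===== SOURCE B (Python) =====
-- def solution(a, m, k):
--     count = 0
--     for i in range(max(m - 1, 0), len(a)):
--         seen = set()
--         for q in range(max(i - m + 1, 0), i + 1):
--             if k - a[q] in seen:
--                 count += 1
--                 break
--             seen.add(a[q])
--     return count
-- ===== Notes on version B (the rewrite author's own statement) =====
-- stated objective: simpler
-- what changed: A tracks a last-index dictionary and the first index of the most recent in-window pair in one incremental pass; B counts windows directly, scanning each length-m window for a pair summing to k with a fresh per-window two-sum set.
import Mathlib
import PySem

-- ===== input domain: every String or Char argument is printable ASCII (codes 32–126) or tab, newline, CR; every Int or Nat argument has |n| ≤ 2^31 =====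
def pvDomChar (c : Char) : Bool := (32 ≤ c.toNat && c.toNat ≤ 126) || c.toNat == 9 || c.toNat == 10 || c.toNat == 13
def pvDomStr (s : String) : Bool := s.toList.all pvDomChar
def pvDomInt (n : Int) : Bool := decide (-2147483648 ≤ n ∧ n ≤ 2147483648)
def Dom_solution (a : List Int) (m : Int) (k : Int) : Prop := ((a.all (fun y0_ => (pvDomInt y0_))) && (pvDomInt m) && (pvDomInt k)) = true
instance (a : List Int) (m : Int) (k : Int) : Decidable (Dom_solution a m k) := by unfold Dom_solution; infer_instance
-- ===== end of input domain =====

-- B replaces A's incremental last-index dictionary and last-pair tracking with a direct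
-- per-window two-sum scan: each length-m window is checked for a pair summing to k with a
-- fresh set (objective: simpler).

-- ===== PORT A =====
-- one step of A's loop body: state (seen, output, first_element_index), item (i, num)
def stepA (m k : Int) (st : PySem.Dict Int Int × Int × Int) (iv : Int × Int) :
    PySem.Dict Int Int × Int × Int :=
  let seen := st.1
  let output := st.2.1
  let fi0 := st.2.2
  let i := iv.1
  let num := iv.2
  let diff := k - num
  let fi1 :=
    match seen.get? diff with
    | some j => if i - j < m then max fi0 j else fi0
    | none => fi0
  let output' := if m - 1 ≤ i ∧ i - fi1 < m then output + 1 else output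
  (seen.insert num i, output', fi1)

def solution (a : List Int) (m : Int) (k : Int) : Int :=
  ((PySem.List.enumerate a).foldl (stepA m k) (PySem.Dict.empty, 0, -1)).2.1

-- ===== PORT B =====
-- B's inner `for q in range(...): if k - a[q] in seen: … break; seen.add(a[q])` loop over the
-- index list; returning true is the `break` that makes the outer loop count the window; a[q]
-- is always in range here (0 ≤ q ≤ i < len a), so pyGetD with default 0 is exact
def winScan (a : List Int) (kk : Int) : List Int → PySem.Set Int → Bool
  | [], _ => false
  | q :: rest, seen =>
    if seen.contains (kk - PySem.List.pyGetD a q 0) then true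
    else winScan a kk rest (seen.add (PySem.List.pyGetD a q 0))

def winB (a : List Int) (m k i : Int) : Bool :=
  winScan a k (PySem.List.pyRange (max (i - m + 1) 0) (i + 1)) PySem.Set.empty

def solution_alt (a : List Int) (m : Int) (k : Int) : Int :=
  (PySem.List.pyRange (max (m - 1) 0) (a.length : Int)).foldl
    (fun count i => if winB a m k i then count + 1 else count) 0

-- ===== PRECONDITION & SPEC =====
def Spec_solution (a : List Int) (m : Int) (k : Int) (out : Int) : Prop := out = solution_alt a m k
instance (a : List Int) (m : Int) (k : Int) (out : Int) : Decidable (Spec_solution a m k out) := by unfold Spec_solution; infer_instance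

-- ===== CLAIM (what is proved, stated in full; the proofs are below) =====
def Claim_equal_solution : Prop := ∀ (a : List Int) (m : Int) (k : Int), Dom_solution a m k → Spec_solution a m k (solution a m k)

-- ===== LEMMAS AND PROOFS =====

-- largest j < t with a.getD j 0 = v (what A's `seen` dictionary holds after t steps)
def lastIdx (a : List Int) (v : Int) : Nat → Option Nat
  | 0 => none
  | t + 1 => if a.getD t 0 = v then some t else lastIdx a v t

-- A's `first_element_index` after t steps
def fiRef (a : List Int) (m k : Int) : Nat → Int
  | 0 => -1
  | t + 1 =>
    match lastIdx a (k - a.getD t 0) t with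
    | some j => if (t : Int) - (j : Int) < m then max (fiRef a m k t) (j : Int) else fiRef a m k t
    | none => fiRef a m k t

-- whether A increments its counter at step t
def goodB (a : List Int) (m k : Int) (t : Nat) : Bool :=
  decide (m - 1 ≤ (t : Int) ∧ (t : Int) - fiRef a m k (t + 1) < m)

-- A's `seen` after t steps
def seenRef (a : List Int) (s : Nat) : PySem.Dict Int Int :=
  (List.range s).foldl (fun d j => d.insert (a.getD j 0) (j : Int)) PySem.Dict.empty

-- the window ending at i contains a pair of indices summing to k
def PairAt (a : List Int) (m k i : Int) : Prop :=
  ∃ p q : Nat, p < q ∧ (q : Int) ≤ i ∧ i - (p : Int) < m ∧ q < a.length ∧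
    a.getD p 0 + a.getD q 0 = k

lemma lastIdx_succ (a : List Int) (v : Int) (t : Nat) :
    lastIdx a v (t + 1) = if a.getD t 0 = v then some t else lastIdx a v t := rfl

lemma fiRef_succ (a : List Int) (m k : Int) (t : Nat) :
    fiRef a m k (t + 1) =
      match lastIdx a (k - a.getD t 0) t with
      | some j => if (t : Int) - (j : Int) < m then max (fiRef a m k t) (j : Int) else fiRef a m k t
      | none => fiRef a m k t := rfl

lemma fiRef_succ_some (a : List Int) (m k : Int) (t j : Nat)
    (h : lastIdx a (k - a.getD t 0) t = some j) :
    fiRef a m k (t + 1)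
      = if (t : Int) - (j : Int) < m then max (fiRef a m k t) (j : Int) else fiRef a m k t := by
  rw [fiRef_succ, h]

lemma fiRef_succ_none (a : List Int) (m k : Int) (t : Nat)
    (h : lastIdx a (k - a.getD t 0) t = none) :
    fiRef a m k (t + 1) = fiRef a m k t := by
  rw [fiRef_succ, h]

lemma lastIdx_spec (a : List Int) (v : Int) (t : Nat) {j : Nat}
    (h : lastIdx a v t = some j) :
    j < t ∧ a.getD j 0 = v ∧ ∀ j', j < j' → j' < t → a.getD j' 0 ≠ v := by
  induction t with
  | zero => simp [lastIdx] at h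
  | succ t ih =>
    rw [lastIdx_succ] at h
    split_ifs at h with hv
    · cases h
      exact ⟨Nat.lt_succ_self _, hv, fun j' h1 h2 _ => absurd h2 (by omega)⟩
    · obtain ⟨h1, h2, h3⟩ := ih h
      refine ⟨by omega, h2, fun j' hj1 hj2 => ?_⟩
      rcases Nat.lt_succ_iff_lt_or_eq.1 hj2 with h' | h'
      · exact h3 j' hj1 h'
      · subst h'; exact hv

lemma lastIdx_ge (a : List Int) (v : Int) (t : Nat) {p : Nat}
    (hp : p < t) (hv : a.getD p 0 = v) :
    ∃ j, lastIdx a v t = some j ∧ p ≤ j := by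
  induction t with
  | zero => omega
  | succ t ih =>
    rw [lastIdx_succ]
    by_cases ht : a.getD t 0 = v
    · exact ⟨t, by rw [if_pos ht], by omega⟩
    · have hp' : p < t := by
        rcases Nat.lt_succ_iff_lt_or_eq.1 hp with h | h
        · exact h
        · subst h; exact absurd hv ht
      obtain ⟨j, hj1, hj2⟩ := ih hp'
      exact ⟨j, by rw [if_neg ht]; exact hj1, hj2⟩

lemma seenRef_get? (a : List Int) (s : Nat) (v : Int) :
    (seenRef a s).get? v = (lastIdx a v s).map (fun j => (j : Int)) := by
  induction s with
  | zero => simp [seenRef, lastIdx, PySem.Dict.empty, PySem.Dict.get?]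
  | succ s ih =>
    have hs : seenRef a (s + 1) = (seenRef a s).insert (a.getD s 0) (s : Int) := by
      simp [seenRef, List.range_succ]
    rw [hs, lastIdx_succ]
    by_cases hv : a.getD s 0 = v
    · subst hv
      rw [PySem.Dict.get?_insert_self, if_pos rfl]
      rfl
    · rw [PySem.Dict.get?_insert_of_ne _ _ (fun h => hv h.symm), if_neg hv, ih]

lemma fiRef_mono (a : List Int) (m k : Int) (t : Nat) :
    fiRef a m k t ≤ fiRef a m k (t + 1) := by
  cases hl : lastIdx a (k - a.getD t 0) t with
  | none => rw [fiRef_succ_none a m k t hl]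
  | some j =>
    rw [fiRef_succ_some a m k t j hl]
    split_ifs
    · exact le_max_left _ _
    · exact le_rfl

-- soundness: a nonnegative fiRef is the first element of a pair (p, q), q < t, q - p < m
lemma fiRef_sound (a : List Int) (m k : Int) (t : Nat) (h : 0 ≤ fiRef a m k t) :
    ∃ p q : Nat, (p : Int) = fiRef a m k t ∧ p < q ∧ q < t ∧ (q : Int) - (p : Int) < m ∧
      a.getD p 0 + a.getD q 0 = k := by
  induction t with
  | zero => simp [fiRef] at h
  | succ t ih =>
    cases hl : lastIdx a (k - a.getD t 0) t with
    | none =>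
      rw [fiRef_succ_none a m k t hl] at h ⊢
      obtain ⟨p, q, h1, h2, h3, h4, h5⟩ := ih h
      exact ⟨p, q, h1, h2, by omega, h4, h5⟩
    | some j =>
      rw [fiRef_succ_some a m k t j hl] at h ⊢
      obtain ⟨hj1, hj2, _⟩ := lastIdx_spec a _ t hl
      split_ifs at h ⊢ with hcond
      · rcases max_cases (fiRef a m k t) ((j : Nat) : Int) with ⟨he, _⟩ | ⟨he, _⟩
        · rw [he] at h ⊢
          obtain ⟨p, q, h1, h2, h3, h4, h5⟩ := ih h
          exact ⟨p, q, h1, h2, by omega, h4, h5⟩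
        · exact ⟨j, t, he.symm, hj1, by omega, hcond, by omega⟩
      · obtain ⟨p, q, h1, h2, h3, h4, h5⟩ := ih h
        exact ⟨p, q, h1, h2, by omega, h4, h5⟩

-- maximality: every pair (p, q) with q < t and q - p < m has p ≤ fiRef
lemma fiRef_max (a : List Int) (m k : Int) (t : Nat) (p q : Nat)
    (h1 : p < q) (h2 : q < t) (h3 : (q : Int) - (p : Int) < m)
    (h4 : a.getD p 0 + a.getD q 0 = k) :
    (p : Int) ≤ fiRef a m k t := by
  induction t with
  | zero => omega
  | succ t ih =>
    rcases Nat.lt_succ_iff_lt_or_eq.1 h2 with h' | h'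
    · exact le_trans (ih h') (fiRef_mono a m k t)
    · subst h'
      have hv : a.getD p 0 = k - a.getD q 0 := by omega
      obtain ⟨j, hj, hpj⟩ := lastIdx_ge a (k - a.getD q 0) q h1 hv
      have hpj' : (p : Int) ≤ (j : Int) := by exact_mod_cast hpj
      rw [fiRef_succ_some a m k q j hj]
      have hc : (q : Int) - (j : Int) < m := by omega
      rw [if_pos hc]
      exact le_trans hpj' (le_max_right _ _)

-- A increments at step t < len a exactly when t ≥ m-1 and the window ending at t has a pair
lemma goodB_iff (a : List Int) (m k : Int) (t : Nat) (ht : t < a.length) :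
    goodB a m k t = true ↔ (m - 1 ≤ (t : Int) ∧ PairAt a m k (t : Int)) := by
  unfold goodB
  rw [decide_eq_true_iff]
  constructor
  · rintro ⟨hm, hfi⟩
    refine ⟨hm, ?_⟩
    have h0 : 0 ≤ fiRef a m k (t + 1) := by omega
    obtain ⟨p, q, h1, h2, h3, h4, h5⟩ := fiRef_sound a m k (t + 1) h0
    exact ⟨p, q, h2, by omega, by omega, by omega, h5⟩
  · rintro ⟨hm, p, q, h1, h2, h3, h4, h5⟩
    refine ⟨hm, ?_⟩
    have hq : q < t + 1 := by omega
    have := fiRef_max a m k (t + 1) p q h1 hq (by omega) h5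
    omega

lemma winScan_cons (a : List Int) (kk q : Int) (rest : List Int) (s : PySem.Set Int) :
    winScan a kk (q :: rest) s
      = if s.contains (kk - PySem.List.pyGetD a q 0) then true
        else winScan a kk rest (s.add (PySem.List.pyGetD a q 0)) := rfl

lemma set_contains_iff (s : PySem.Set Int) (x : Int) : s.contains x = true ↔ x ∈ s := by
  simp [PySem.Set.contains]

-- what B's inner scan decides: some later index q has a partner among the earlier ones (or in s)
lemma winScan_iff (a : List Int) (kk hi : Int) :
    ∀ (n : Nat) (lo : Int) (s : PySem.Set Int), (hi - lo).toNat = n →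
    (winScan a kk (PySem.List.pyRange lo hi) s = true ↔
      ∃ q : Int, lo ≤ q ∧ q < hi ∧
        ((kk - PySem.List.pyGetD a q 0) ∈ s ∨
         ∃ p : Int, lo ≤ p ∧ p < q ∧
           PySem.List.pyGetD a p 0 = kk - PySem.List.pyGetD a q 0)) := by
  intro n
  induction n with
  | zero =>
    intro lo s hn
    have hle : hi ≤ lo := by omega
    rw [PySem.List.pyRange_one_eq_nil hle]
    constructor
    · intro h; exact absurd h (by simp [winScan])
    · rintro ⟨q, h1, h2, _⟩; omega
  | succ n ih =>
    intro lo s hn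
    have hlt : lo < hi := by omega
    rw [PySem.List.pyRange_one_cons hlt, winScan_cons]
    by_cases hc : s.contains (kk - PySem.List.pyGetD a lo 0) = true
    · rw [if_pos hc]
      exact iff_of_true rfl ⟨lo, le_rfl, hlt, Or.inl ((set_contains_iff s _).1 hc)⟩
    · rw [if_neg hc]
      have hnm : (kk - PySem.List.pyGetD a lo 0) ∉ s :=
        fun h => hc ((set_contains_iff s _).2 h)
      rw [ih (lo + 1) (s.add (PySem.List.pyGetD a lo 0)) (by omega)]
      constructor
      · rintro ⟨q, hq1, hq2, hmem | ⟨p, hp1, hp2, hp3⟩⟩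
        · rcases (PySem.Set.mem_add s _ _).1 hmem with h | h
          · exact ⟨q, by omega, hq2, Or.inl h⟩
          · exact ⟨q, by omega, hq2, Or.inr ⟨lo, le_rfl, by omega, h.symm⟩⟩
        · exact ⟨q, by omega, hq2, Or.inr ⟨p, by omega, hp2, hp3⟩⟩
      · rintro ⟨q, hq1, hq2, hmem | ⟨p, hp1, hp2, hp3⟩⟩
        · by_cases hq : q = lo
          · subst hq; exact absurd hmem hnm
          · exact ⟨q, by omega, hq2, Or.inl ((PySem.Set.mem_add s _ _).2 (Or.inl hmem))⟩
        · by_cases hp : p = lo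
          · subst hp
            exact ⟨q, by omega, hq2,
              Or.inl ((PySem.Set.mem_add s _ _).2 (Or.inr hp3.symm))⟩
          · exact ⟨q, by omega, hq2, Or.inr ⟨p, by omega, hp2, hp3⟩⟩

-- B's inner scan decides PairAt (for the window ends B actually visits: i < len a)
lemma winB_iff (a : List Int) (m k i : Int) (hi : i < (a.length : Int)) :
    winB a m k i = true ↔ PairAt a m k i := by
  unfold winB PairAt
  rw [winScan_iff a k (i + 1) ((i + 1) - max (i - m + 1) 0).toNat (max (i - m + 1) 0)
    PySem.Set.empty rfl]
  constructor
  · rintro ⟨q, hq1, hq2, hmem | ⟨p, hp1, hp2, hp3⟩⟩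
    · exact absurd hmem (by simp [PySem.Set.empty])
    · have hq0 : 0 ≤ q := le_trans (le_max_right _ _) hq1
      have hp0 : 0 ≤ p := le_trans (le_max_right _ _) hp1
      have hple := le_trans (le_max_left (i - m + 1) 0) hp1
      rw [PySem.List.pyGetD_of_nonneg _ _ hp0, PySem.List.pyGetD_of_nonneg _ _ hq0] at hp3
      exact ⟨p.toNat, q.toNat, by omega, by omega, by omega, by omega, by omega⟩
  · rintro ⟨p, q, h1, h2, h3, h4, h5⟩
    refine ⟨(q : Int), ?_, by omega, Or.inr ⟨(p : Int), ?_, by exact_mod_cast h1, ?_⟩⟩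
    · exact max_le (by omega) (by omega)
    · exact max_le (by omega) (by omega)
    · rw [PySem.List.pyGetD_natCast, PySem.List.pyGetD_natCast]
      omega

lemma winB_neg (a : List Int) (m k i : Int) (hi : i < 0) : winB a m k i = false := by
  unfold winB
  rw [PySem.List.pyRange_one_eq_nil (le_trans (by omega) (le_max_right (i - m + 1) 0))]
  rfl

-- A's loop runs over (j, a[j]) for j = 0 .. len a - 1
lemma enumerate_eq (a : List Int) (s : Int) :
    PySem.List.enumerate a s
      = (List.range a.length).map (fun j : Nat => ((s + (j : Int), a.getD j 0) : Int × Int)) := by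
  induction a generalizing s with
  | nil => simp [PySem.List.enumerate]
  | cons x xs ih =>
    show (s, x) :: PySem.List.enumerate xs (s + 1) = _
    rw [ih]
    simp only [List.length_cons, List.range_succ_eq_map, List.map_cons, List.map_map]
    refine congrArg₂ _ (by simp) ?_
    apply List.map_congr_left
    intro j _
    simp only [Function.comp_apply, List.getD_cons_succ, Prod.mk.injEq]
    refine ⟨by push_cast; ring, by simp⟩

-- A's fold after s steps: the dictionary, the counter and first_element_index
lemma foldA_eq (a : List Int) (m k : Int) (s : Nat) :
    ((List.range s).map (fun j : Nat => (((j : Int), a.getD j 0) : Int × Int))).foldl (stepA m k)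
      (PySem.Dict.empty, 0, -1)
    = (seenRef a s, (List.countP (goodB a m k) (List.range s) : Int), fiRef a m k s) := by
  induction s with
  | zero => simp [seenRef, fiRef]
  | succ s ih =>
    rw [List.range_succ, List.map_append, List.foldl_append, ih]
    simp only [List.map_cons, List.map_nil, List.foldl_cons, List.foldl_nil]
    show stepA m k _ _ = _
    unfold stepA
    simp only [seenRef_get?]
    have hseen : (seenRef a s).insert (a.getD s 0) (s : Int) = seenRef a (s + 1) := by
      simp [seenRef, List.range_succ]
    have hfi :
        (match (lastIdx a (k - a.getD s 0) s).map (fun j => (j : Int)) with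
          | some j => if (s : Int) - j < m then max (fiRef a m k s) j else fiRef a m k s
          | none => fiRef a m k s) = fiRef a m k (s + 1) := by
      rw [fiRef_succ]
      cases lastIdx a (k - a.getD s 0) s with
      | none => rfl
      | some j => rfl
    rw [Prod.mk.injEq, Prod.mk.injEq, hfi]
    refine ⟨hseen, ?_, rfl⟩
    have hg : goodB a m k s = true ↔ (m - 1 ≤ (s : Int) ∧ (s : Int) - fiRef a m k (s + 1) < m) :=
      decide_eq_true_iff
    rw [List.countP_append]
    simp only [List.countP_cons, List.countP_nil, Nat.zero_add]
    split_ifs with h1 h2 h2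
    · push_cast; ring
    · exact absurd (hg.2 h1) (by simp [h2])
    · exact absurd (hg.1 h2) h1
    · push_cast; ring

-- counting over an Int range vs over the corresponding Nat range
lemma countP_pyRange_eq (q : Int → Bool) (c : Int) (N : Nat)
    (hneg : ∀ i : Int, i < 0 → q i = false) :
    List.countP q (PySem.List.pyRange c (N : Int))
      = List.countP (fun t : Nat => decide (c ≤ (t : Int)) && q (t : Int)) (List.range N) := by
  induction N with
  | zero =>
    simp only [Nat.cast_zero, List.range_zero, List.countP_nil]
    apply List.countP_eq_zero.2
    intro i hi
    rw [PySem.List.mem_pyRange_one] at hi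
    simp [hneg i (by omega)]
  | succ N ih =>
    by_cases hc : c ≤ (N : Int)
    · have hcast : ((N + 1 : Nat) : Int) = (N : Int) + 1 := by push_cast; ring
      rw [hcast, PySem.List.pyRange_one_succ_right hc, List.countP_append,
        List.range_succ, List.countP_append, ih]
      simp [List.countP_cons, hc]
    · have hnil : PySem.List.pyRange c ((N + 1 : Nat) : Int) = [] := by
        apply PySem.List.pyRange_one_eq_nil
        push_cast; omega
      rw [hnil]
      simp only [List.countP_nil]
      symm
      apply List.countP_eq_zero.2
      intro t ht
      rw [List.mem_range] at ht
      have hct : ¬ c ≤ (t : Int) := by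
        have : (t : Int) ≤ (N : Int) := by exact_mod_cast Nat.lt_succ_iff.1 ht
        omega
      simp [hct]

lemma solution_eq_count (a : List Int) (m k : Int) :
    solution a m k = (List.countP (goodB a m k) (List.range a.length) : Int) := by
  unfold solution
  have he : PySem.List.enumerate a 0
      = (List.range a.length).map (fun j : Nat => (((j : Int), a.getD j 0) : Int × Int)) := by
    rw [enumerate_eq]
    apply List.map_congr_left
    intro j _
    simp
  rw [show PySem.List.enumerate a = PySem.List.enumerate a 0 from rfl, he, foldA_eq]

lemma solution_alt_eq_count (a : List Int) (m k : Int) :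
    solution_alt a m k
      = (List.countP (winB a m k) (PySem.List.pyRange (max (m - 1) 0) (a.length : Int)) : Int) := by
  unfold solution_alt
  rw [PySem.List.foldl_count_if (winB a m k) _ 0]
  simp

-- ===== VERDICT (by name: the statement is the Claim_ definition above) =====
theorem solution_spec : Claim_equal_solution := by
  intro a m k _
  unfold Spec_solution
  rw [solution_eq_count, solution_alt_eq_count,
    countP_pyRange_eq (winB a m k) (max (m - 1) 0) a.length (fun i hi => winB_neg a m k i hi)]
  congr 1
  apply List.countP_congr
  intro t ht
  rw [List.mem_range] at ht
  have htl : (t : Int) < (a.length : Int) := by exact_mod_cast ht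
  rw [Bool.eq_iff_iff, goodB_iff a m k t ht, Bool.and_eq_true, decide_eq_true_iff,
    winB_iff a m k (t : Int) htl]
  have h0 : (0 : Int) ≤ (t : Int) := Int.natCast_nonneg t
  have hmx : (max (m - 1) 0 ≤ (t : Int)) ↔ (m - 1 ≤ (t : Int)) :=
    ⟨fun h => le_trans (le_max_left _ _) h, fun h => max_le h h0⟩
  rw [hmx]
  simp
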